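-- pv_equiv track=rewrite | github.com/SoA-Lee/Moon-Study | Baekjoon/AlgorithmEx/Q3.py | match_two
-- ===== SOURCE A (Python) =====
-- def match_two(a):
--     n = len(a)
--     result = set()
--     for i in range(0, n-1):
--         for j in range(i+1, n):
--             if a[i] != a[j]:
--                 result.add(a[i]+' - '+a[j])
--     return result
-- ===== SOURCE B (Python) =====
-- def match_two(a):
--     # Skip outer indices whose value was already processed: each distinct
--     # value contributes its full pair set at its first occurrence already.
--     n = len(a)
--     result = set()
--     seen = set()
--     for i in range(n):
--         x = a[i]
--         if x not in seen:
--             seen.add(x)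
--             for y in a[i + 1:]:
--                 if y != x:
--                     result.add(x + ' - ' + y)
--     return result
-- ===== Notes on version B (the rewrite author's own statement) =====
-- stated objective: alternative
-- what changed: B keeps a 'seen' set and runs the inner pair-building scan only at each value's first occurrence (later duplicate outer values can add nothing new), replacing A's scan over every index pair; intended to cut work on duplicate-heavy inputs, measured only ~1.2x on the check's inputs.
import Mathlib
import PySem

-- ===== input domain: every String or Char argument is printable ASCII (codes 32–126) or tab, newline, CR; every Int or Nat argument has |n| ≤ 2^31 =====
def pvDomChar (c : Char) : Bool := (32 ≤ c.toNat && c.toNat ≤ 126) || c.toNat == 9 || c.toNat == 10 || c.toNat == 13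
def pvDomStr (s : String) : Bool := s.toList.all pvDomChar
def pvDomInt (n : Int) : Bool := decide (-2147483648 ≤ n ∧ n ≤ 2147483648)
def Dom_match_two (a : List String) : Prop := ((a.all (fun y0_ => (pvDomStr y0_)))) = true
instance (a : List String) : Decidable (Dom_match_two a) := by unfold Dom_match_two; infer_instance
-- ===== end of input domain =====

-- B runs the inner pair-building scan only at each value's first occurrence (a 'seen' set);
-- later duplicate outer values can add nothing new, so the resulting set (and its
-- first-insertion order) is unchanged while only one inner scan per distinct value remains.

-- ===== PORT A =====
def match_two (a : List String) : List String :=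
  let n : Int := PySem.List.len a
  (PySem.List.pyRange 0 (n - 1)).foldl
    (fun result i =>
      (PySem.List.pyRange (i + 1) n).foldl
        (fun result j =>
          if PySem.List.pyGetD a i "" ≠ PySem.List.pyGetD a j "" then
            PySem.Set.add result (PySem.List.pyGetD a i "" ++ " - " ++ PySem.List.pyGetD a j "")
          else result)
        result)
    PySem.Set.empty

-- ===== PORT B =====
def match_two_alt (a : List String) : List String :=
  let n : Int := PySem.List.len a
  ((PySem.List.pyRange 0 n).foldl
    (fun (st : List String × List String) i =>
      let x := PySem.List.pyGetD a i ""
      if PySem.Set.contains st.2 x then st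
      else
        ((PySem.List.slice a (some (i + 1)) none).foldl
           (fun result y => if y ≠ x then PySem.Set.add result (x ++ " - " ++ y) else result)
           st.1,
         PySem.Set.add st.2 x))
    (PySem.Set.empty, PySem.Set.empty)).1

-- ===== PRECONDITION & SPEC =====
def Spec_match_two (a : List String) (out : List String) : Prop := out = match_two_alt a
instance (a : List String) (out : List String) : Decidable (Spec_match_two a out) := by unfold Spec_match_two; infer_instance

-- ===== CLAIM (what is proved, stated in full; the proofs are below) =====
def Claim_equal_match_two : Prop := ∀ (a : List String), Dom_match_two a → Spec_match_two a (match_two a)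

-- ===== LEMMAS AND PROOFS =====

-- One step of the inner loop (B's orientation of the disequality test).
def mtStep (x : String) (s : List String) (y : String) : List String :=
  if y ≠ x then PySem.Set.add s (x ++ " - " ++ y) else s

-- The whole inner loop: add "x - y" for every y ≠ x in l.
def mtInner (x : String) (s : List String) (l : List String) : List String :=
  l.foldl (mtStep x) s

lemma mem_mtInner (x : String) (l : List String) (s : List String) (e : String)
    (h : e ∈ s) : e ∈ mtInner x s l := by
  induction l generalizing s with
  | nil => exact h
  | cons y t ih =>
    apply ih
    unfold mtStep
    split
    · exact (PySem.Set.mem_add s (x ++ " - " ++ y) e).2 (Or.inl h)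
    · exact h

lemma mtInner_complete (x y : String) (l s : List String)
    (hy : y ∈ l) (hne : y ≠ x) : (x ++ " - " ++ y) ∈ mtInner x s l := by
  induction l generalizing s with
  | nil => cases hy
  | cons z t ih =>
    rcases List.mem_cons.1 hy with rfl | h
    · refine mem_mtInner x t (mtStep x s y) _ ?_
      unfold mtStep
      rw [if_pos hne]
      exact (PySem.Set.mem_add s (x ++ " - " ++ y) _).2 (Or.inr rfl)
    · exact ih (mtStep x s z) h

lemma mtInner_noop (x : String) (l s : List String)
    (h : ∀ y ∈ l, y ≠ x → (x ++ " - " ++ y) ∈ s) : mtInner x s l = s := by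
  induction l with
  | nil => rfl
  | cons z t ih =>
    have hz : mtStep x s z = s := by
      unfold mtStep
      split
      · next hne => exact PySem.Set.add_of_mem (h z (List.mem_cons_self) hne)
      · rfl
    show mtInner x (mtStep x s z) t = s
    rw [hz]
    exact ih (fun y hy => h y (List.mem_cons_of_mem _ hy))

-- Nat-indexed bodies of the two outer loops.
def mtBodyA (a : List String) (s : List String) (i : Nat) : List String :=
  mtInner (a.getD i "") s (a.drop (i + 1))

def mtBodyB (a : List String) (st : List String × List String) (i : Nat) :
    List String × List String :=
  let x := a.getD i ""
  if PySem.Set.contains st.2 x then st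
  else (mtInner x st.1 (a.drop (i + 1)), PySem.Set.add st.2 x)

-- Invariant after the first lo outer iterations: every pair whose left index is < lo is in s.
def mtInv (a : List String) (s : List String) (lo : Nat) : Prop :=
  ∀ i j : Nat, i < lo → i < j → j < a.length → a.getD j "" ≠ a.getD i "" →
    (a.getD i "" ++ " - " ++ a.getD j "") ∈ s

lemma takeMem_pair (a : List String) (lo j : Nat) (s : List String)
    (hinv : mtInv a s lo) (hmem : a.getD lo "" ∈ a.take lo)
    (hj : j < a.length) (hjlo : lo < j)
    (hne : a.getD j "" ≠ a.getD lo "") :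
    (a.getD lo "" ++ " - " ++ a.getD j "") ∈ s := by
  obtain ⟨i0, hi0, hxi0⟩ := List.getElem_of_mem hmem
  have hi0lt : i0 < lo := by
    have h := hi0; rw [List.length_take] at h; omega
  have hi0len : i0 < a.length := by omega
  have hxi0' : a.getD i0 "" = a.getD lo "" := by
    rw [List.getD_eq_getElem a "" hi0len, ← hxi0, List.getElem_take]
  have := hinv i0 j hi0lt (by omega) hj (by rw [hxi0']; exact hne)
  rwa [hxi0'] at this

lemma getD_mem_drop (a : List String) (lo j : Nat) (hj : j < a.length)
    (hjlo : lo < j) : a.getD j "" ∈ a.drop (lo + 1) := by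
  rw [List.getD_eq_getElem a "" hj]
  have hjm : j - (lo + 1) < (a.drop (lo + 1)).length := by
    rw [List.length_drop]; omega
  have hget : (a.drop (lo + 1))[j - (lo + 1)] = a[j] := by
    rw [List.getElem_drop]; congr 1; omega
  rw [← hget]
  exact List.getElem_mem hjm

lemma mtMain (a : List String) (k : Nat) : ∀ (lo : Nat) (s seen : List String),
    lo + k = a.length → mtInv a s lo → seen = PySem.Set.ofList (a.take lo) →
    (List.range' lo k).foldl (mtBodyA a) s =
      ((List.range' lo k).foldl (mtBodyB a) (s, seen)).1 := by
  induction k with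
  | zero => intro lo s seen _ _ _; rfl
  | succ k ih =>
    intro lo s seen hlen hinv hseen
    have hlo : lo < a.length := by omega
    rw [List.range'_succ, List.foldl_cons, List.foldl_cons]
    have htake : a.take (lo + 1) = a.take lo ++ [a.getD lo ""] := by
      rw [List.take_add_one, List.getElem?_eq_getElem hlo,
        List.getD_eq_getElem a "" hlo]
      rfl
    by_cases hmem : a.getD lo "" ∈ a.take lo
    · -- duplicate outer value: both sides are no-ops
      have hcont : PySem.Set.contains seen (a.getD lo "") = true := by
        rw [hseen, PySem.Set.contains_iff]
        exact (PySem.Set.mem_ofList _ _).2 hmem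
      have hB : mtBodyB a (s, seen) lo = (s, seen) := by
        simp only [mtBodyB, hcont, if_true]
      have hA : mtBodyA a s lo = s := by
        unfold mtBodyA
        apply mtInner_noop
        intro y hy hne
        obtain ⟨m, hm, hym⟩ := List.getElem_of_mem hy
        have hmlen : lo + 1 + m < a.length := by
          have h := hm; rw [List.length_drop] at h; omega
        have hyj : a.getD (lo + 1 + m) "" = y := by
          rw [List.getD_eq_getElem a "" hmlen, ← hym, List.getElem_drop]
        have := takeMem_pair a lo (lo + 1 + m) s hinv hmem hmlen (by omega)
          (by rw [hyj]; exact hne)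
        rwa [hyj] at this
      rw [hA, hB]
      refine ih (lo + 1) s seen (by omega) ?_ ?_
      · intro i j hi hij hj hne
        rcases Nat.lt_or_ge i lo with h | h
        · exact hinv i j h hij hj hne
        · have hilo : i = lo := by omega
          subst hilo
          exact takeMem_pair a i j s hinv hmem hj hij hne
      · rw [hseen, htake, PySem.Set.ofList_eq_foldl, PySem.Set.ofList_eq_foldl,
          List.foldl_append, List.foldl_cons, List.foldl_nil,
          ← PySem.Set.ofList_eq_foldl]
        exact (PySem.Set.add_of_mem ((PySem.Set.mem_ofList _ _).2 hmem)).symm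
    · -- first occurrence: both sides run the inner loop
      have hcont : PySem.Set.contains seen (a.getD lo "") = false := by
        rw [hseen]
        refine Bool.eq_false_iff.2 (fun h => hmem ?_)
        exact (PySem.Set.mem_ofList _ _).1 ((PySem.Set.contains_iff _ _).1 h)
      have hB : mtBodyB a (s, seen) lo =
          (mtInner (a.getD lo "") s (a.drop (lo + 1)), PySem.Set.add seen (a.getD lo "")) := by
        simp only [mtBodyB, hcont, Bool.false_eq_true, if_false]
      have hA : mtBodyA a s lo = mtInner (a.getD lo "") s (a.drop (lo + 1)) := rfl
      rw [hA, hB]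
      refine ih (lo + 1) _ _ (by omega) ?_ ?_
      · intro i j hi hij hj hne
        rcases Nat.lt_or_ge i lo with h | h
        · exact mem_mtInner _ _ _ _ (hinv i j h hij hj hne)
        · have hilo : i = lo := by omega
          subst hilo
          exact mtInner_complete _ _ _ _ (getD_mem_drop a i j hj hij) hne
      · rw [hseen, htake, PySem.Set.ofList_eq_foldl, PySem.Set.ofList_eq_foldl,
          List.foldl_append, List.foldl_cons, List.foldl_nil,
          ← PySem.Set.ofList_eq_foldl]

lemma matchA_eq (a : List String) :
    match_two a = (List.range' 0 a.length).foldl (mtBodyA a) [] := by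
  simp only [match_two]
  by_cases hnil : a = []
  · subst hnil; rfl
  · have hlen : 1 ≤ (a.length : Int) := by
      simp [Nat.one_le_iff_ne_zero, List.length_eq_zero_iff, hnil]
    -- extend the outer range by one (no-op) last index, then go to Nat indices
    have hsplit : PySem.List.pyRange 0 (PySem.List.len a) =
        PySem.List.pyRange 0 (PySem.List.len a - 1) ++ [PySem.List.len a - 1] := by
      have h := PySem.List.pyRange_one_succ_right (a := 0) (b := PySem.List.len a - 1)
        (by simp only [PySem.List.len]; omega)
      rw [show PySem.List.len a - 1 + 1 = PySem.List.len a from by ring] at h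
      exact h
    have hnoop : ∀ s : List String,
        (PySem.List.pyRange (PySem.List.len a - 1 + 1) (PySem.List.len a)).foldl
          (fun result j =>
            if PySem.List.pyGetD a (PySem.List.len a - 1) "" ≠ PySem.List.pyGetD a j "" then
              PySem.Set.add result (PySem.List.pyGetD a (PySem.List.len a - 1) "" ++ " - " ++ PySem.List.pyGetD a j "")
            else result) s = s := by
      intro s
      rw [PySem.List.pyRange_one_eq_nil (by simp only [PySem.List.len]; omega)]
      rfl
    have hfull :
        (PySem.List.pyRange 0 (PySem.List.len a - 1)).foldl
          (fun result i =>
            (PySem.List.pyRange (i + 1) (PySem.List.len a)).foldl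
              (fun result j =>
                if PySem.List.pyGetD a i "" ≠ PySem.List.pyGetD a j "" then
                  PySem.Set.add result (PySem.List.pyGetD a i "" ++ " - " ++ PySem.List.pyGetD a j "")
                else result) result)
          PySem.Set.empty =
        (PySem.List.pyRange 0 (PySem.List.len a)).foldl
          (fun result i =>
            (PySem.List.pyRange (i + 1) (PySem.List.len a)).foldl
              (fun result j =>
                if PySem.List.pyGetD a i "" ≠ PySem.List.pyGetD a j "" then
                  PySem.Set.add result (PySem.List.pyGetD a i "" ++ " - " ++ PySem.List.pyGetD a j "")
                else result) result)
          PySem.Set.empty := by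
      rw [hsplit, List.foldl_append, List.foldl_cons, List.foldl_nil, hnoop]
    rw [hfull, PySem.List.pyRange_one, List.foldl_map]
    have hrange : (PySem.List.len a - 0).toNat = a.length := by
      simp [PySem.List.len]
    rw [hrange, ← List.range_eq_range']
    simp only [zero_add]
    apply PySem.List.foldl_congr_mem
    intro s k _
    rw [PySem.List.foldl_pyRange_pyGetD a ""
      (fun acc y => if PySem.List.pyGetD a (k : Int) "" ≠ y then
        PySem.Set.add acc (PySem.List.pyGetD a (k : Int) "" ++ " - " ++ y) else acc)
      s (by positivity)]
    have h1 : ((k : Int) + 1).toNat = k + 1 := by omega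
    rw [h1]
    simp only [PySem.List.pyGetD_natCast]
    unfold mtBodyA mtInner
    apply PySem.List.foldl_congr_mem
    intro acc y _
    simp only [mtStep, ne_comm]

lemma matchB_eq (a : List String) :
    match_two_alt a = ((List.range' 0 a.length).foldl (mtBodyB a) ([], [])).1 := by
  simp only [match_two_alt]
  rw [PySem.List.pyRange_one, List.foldl_map, ← List.range_eq_range']
  simp only [Int.sub_zero, PySem.List.len, Int.toNat_natCast, zero_add]
  congr 1
  apply PySem.List.foldl_congr_mem
  intro st k _
  have h1 : ((k : Int) + 1) = (((k + 1 : Nat)) : Int) := by push_cast; ring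
  rw [h1]
  simp only [PySem.List.pyGetD_natCast,
    PySem.List.slice_from a (a := ((k + 1 : Nat) : Int)) (by positivity), Int.toNat_natCast]
  rfl

-- ===== VERDICT (by name: the statement is the Claim_ definition above) =====
theorem match_two_spec : Claim_equal_match_two := by
  intro a _
  show match_two a = match_two_alt a
  rw [matchA_eq, matchB_eq]
  exact mtMain a a.length 0 [] [] (by omega) (fun i j hi => by omega) (by simp)
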